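-- pv_equiv track=rewrite | github.com/JagjeetSonwalkar/python_practice | Problem solving/String6.py | countSubstringOccurrences
-- ===== SOURCE A (Python) =====
-- def countSubstringOccurrences(getString, getSubString):
--     firstCharOfSubString = getSubString[0]
--     lenghtofSubString = len(getSubString)
--     word = ""
--     iCount = 0
--
--     for i in getString:
--         if i == " ":
--             pass
--         else:
--             word += i
--
--         if len(word) == lenghtofSubString:
--             if word == getSubString:
--                 iCount += 1
--             word = ""
--
--     return iCount
-- ===== SOURCE B (Python) =====
-- def countSubstringOccurrences(getString, getSubString):
--     stripped = "".join(c for c in getString if c != " ")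
--     L = len(getSubString)
--     count = 0
--     for i in range(0, len(stripped), L):
--         if stripped[i:i+L] == getSubString:
--             count += 1
--     return count
-- ===== Notes on version B (the rewrite author's own statement) =====
-- stated objective: faster
-- what changed: B strips all spaces once and then compares fixed-stride slices stripped[i:i+L] against the substring (one slice comparison per chunk), instead of A's per-character word accumulator that is rebuilt and length-tested on every character.
import Mathlib
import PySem

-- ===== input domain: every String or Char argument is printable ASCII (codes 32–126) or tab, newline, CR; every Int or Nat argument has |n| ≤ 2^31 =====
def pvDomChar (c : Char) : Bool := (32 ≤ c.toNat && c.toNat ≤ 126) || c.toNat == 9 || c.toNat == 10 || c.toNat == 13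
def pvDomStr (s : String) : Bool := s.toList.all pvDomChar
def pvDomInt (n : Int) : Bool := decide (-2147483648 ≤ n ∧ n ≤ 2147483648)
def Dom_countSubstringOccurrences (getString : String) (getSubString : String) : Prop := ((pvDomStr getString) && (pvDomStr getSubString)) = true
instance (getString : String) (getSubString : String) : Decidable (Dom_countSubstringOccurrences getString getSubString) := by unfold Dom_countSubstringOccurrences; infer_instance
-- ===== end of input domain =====

-- B strips all spaces first, then compares fixed-stride slices against the substring,
-- instead of A's per-character accumulator; proved equal whenever getSubString ≠ "" (A raises IndexError on "").


-- ===== PORT A =====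
-- one loop iteration of A: append i to word unless it is a space, then
-- (in the same order as A) test len(word) == len(sub), compare, and reset
def pvStepA (sub : List Char) (st : List Char × Int) (i : Char) : List Char × Int :=
  let word := if i = ' ' then st.1 else st.1 ++ [i]
  if word.length = sub.length then
    (if word = sub then (([] : List Char), st.2 + 1) else (([] : List Char), st.2))
  else (word, st.2)

def countSubstringOccurrences (getString : String) (getSubString : String) : Int :=
  -- A's first line 'getSubString[0]' only raises on "" (excluded by Pre_); its value is unused
  (getString.toList.foldl (pvStepA getSubString.toList) (([] : List Char), (0 : Int))).2

-- ===== PORT B =====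
def countSubstringOccurrences_alt (getString : String) (getSubString : String) : Int :=
  let stripped := getString.toList.filter (fun c => c ≠ ' ')   -- "".join(c for c in getString if c != " ")
  let L : Int := getSubString.toList.length
  (PySem.List.pyRange 0 stripped.length L).foldl
    (fun acc i =>
      if PySem.List.slice stripped (some i) (some (i + L)) = getSubString.toList then acc + 1
      else acc) 0

-- ===== PRECONDITION & SPEC =====
-- A raises IndexError on getSubString = "" (getSubString[0]); B raises ValueError there (range step 0)
def Pre_countSubstringOccurrences (getString : String) (getSubString : String) : Prop := getSubString ≠ ""
instance (getString : String) (getSubString : String) : Decidable (Pre_countSubstringOccurrences getString getSubString) := by unfold Pre_countSubstringOccurrences; infer_instance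
def pvWitness_countSubstringOccurrences : String × String := ("ab cab", "ab")

def Spec_countSubstringOccurrences (getString : String) (getSubString : String) (out : Int) : Prop := out = countSubstringOccurrences_alt getString getSubString
instance (getString : String) (getSubString : String) (out : Int) : Decidable (Spec_countSubstringOccurrences getString getSubString out) := by unfold Spec_countSubstringOccurrences; infer_instance

-- ===== CLAIM (what is proved, stated in full; the proofs are below) =====
def Claim_equal_countSubstringOccurrences : Prop := ∀ (getString : String) (getSubString : String), Dom_countSubstringOccurrences getString getSubString → Pre_countSubstringOccurrences getString getSubString → Spec_countSubstringOccurrences getString getSubString (countSubstringOccurrences getString getSubString)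

-- ===== LEMMAS AND PROOFS =====

-- common reference: number of length-ℓ chunks of cs equal to sub
def pvChunkCount (ℓ : Nat) (sub : List Char) (cs : List Char) : Int :=
  if h : 0 < ℓ ∧ ℓ ≤ cs.length then
    (if cs.take ℓ = sub then 1 else 0) + pvChunkCount ℓ sub (cs.drop ℓ)
  else 0
termination_by cs.length
decreasing_by simp [List.length_drop]; omega

theorem pvChunkCount_small (ℓ : Nat) (sub cs : List Char) (h : cs.length < ℓ) :
    pvChunkCount ℓ sub cs = 0 := by
  rw [pvChunkCount]; simp; omega

theorem pvStepA_no_space (sub : List Char) (st : List Char × Int)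
    (h : st.1.length < sub.length) : pvStepA sub st ' ' = st := by
  simp [pvStepA, Nat.ne_of_lt h]

theorem pvStepA_len (sub : List Char) (st : List Char × Int) (i : Char)
    (h : st.1.length < sub.length) (hℓ : 0 < sub.length) :
    (pvStepA sub st i).1.length < sub.length := by
  simp only [pvStepA]
  by_cases hi : i = ' '
  · simp only [hi, if_true]
    rw [if_neg (Nat.ne_of_lt h)]
    exact h
  · simp only [hi, if_false]
    by_cases hf : (st.1 ++ [i]).length = sub.length
    · rw [if_pos hf]; split <;> simpa using hℓ
    · rw [if_neg hf]; simp at hf ⊢; omega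

-- the fold of A over a space-free list, starting from a partial word w, counts chunks of w ++ cs
theorem pvFoldA_chunks (sub : List Char) (hℓ : 0 < sub.length) :
    ∀ (cs : List Char) (w : List Char) (k : Int), w.length < sub.length →
      (∀ c ∈ cs, c ≠ ' ') →
      (cs.foldl (pvStepA sub) (w, k)).2 = k + pvChunkCount sub.length sub (w ++ cs) := by
  intro cs
  induction cs with
  | nil =>
    intro w k hw _
    simp [pvChunkCount_small sub.length sub w hw]
  | cons c cs' ih =>
    intro w k hw hns
    have hc : c ≠ ' ' := hns c (List.mem_cons_self ..)
    have hns' : ∀ x ∈ cs', x ≠ ' ' := fun x hx => hns x (List.mem_cons_of_mem _ hx)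
    simp only [List.foldl_cons]
    by_cases hfull : (w ++ [c]).length = sub.length
    · have hstep : pvStepA sub (w, k) c =
        (([] : List Char), if w ++ [c] = sub then k + 1 else k) := by
        simp [pvStepA, hc, hfull]
        split_ifs <;> rfl
      rw [hstep, ih [] _ (by simpa using hℓ) hns']
      have hsplit : w ++ c :: cs' = (w ++ [c]) ++ cs' := by simp
      have hcount : pvChunkCount sub.length sub (w ++ c :: cs') =
          (if w ++ [c] = sub then 1 else 0) + pvChunkCount sub.length sub cs' := by
        rw [hsplit, pvChunkCount]
        have hlen : ((w ++ [c]) ++ cs').length = sub.length + cs'.length := by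
          simp at hfull ⊢; omega
        have htake : ((w ++ [c]) ++ cs').take sub.length = w ++ [c] := by
          rw [← hfull, List.take_left]
        have hdrop : ((w ++ [c]) ++ cs').drop sub.length = cs' := by
          rw [← hfull, List.drop_left]
        rw [htake, hdrop]
        simp only [hlen]
        split_ifs <;> simp_all <;> omega
      rw [hcount]
      split_ifs <;> simp <;> ring
    · have hlt : (w ++ [c]).length < sub.length := by
        simp at hfull ⊢; omega
      have hfull' : ¬ (w.length + 1 = sub.length) := by simp at hfull; omega
      have hstep : pvStepA sub (w, k) c = (w ++ [c], k) := by
        simp [pvStepA, hc, hfull']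
      rw [hstep, ih _ _ hlt hns']
      simp
  
-- spaces are no-ops for A's fold (the word never has length sub.length when a space arrives)
theorem pvFoldA_filter (sub : List Char) (hℓ : 0 < sub.length) :
    ∀ (s : List Char) (w : List Char) (k : Int), w.length < sub.length →
      s.foldl (pvStepA sub) (w, k) = (s.filter (fun c => c ≠ ' ')).foldl (pvStepA sub) (w, k) := by
  intro s
  induction s with
  | nil => intro w k _; rfl
  | cons c s' ih =>
    intro w k hw
    by_cases hc : c = ' '
    · subst hc
      simp only [List.foldl_cons, List.filter_cons]
      rw [pvStepA_no_space sub (w, k) hw]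
      simpa using ih w k hw
    · have hdec : decide (c ≠ ' ') = true := by simp [hc]
      simp only [List.foldl_cons, List.filter_cons, hdec, if_true]
      have hw' := pvStepA_len sub (w, k) c hw hℓ
      rcases hst : pvStepA sub (w, k) c with ⟨w2, k2⟩
      rw [hst] at hw'
      exact ih w2 k2 hw'

-- peel the first index off a stride-ℓ range
theorem pvRange_peel (ℓ : Int) (hℓ : 0 < ℓ) (n : Int) (hn : 0 < n) :
    PySem.List.pyRange 0 n ℓ = 0 :: (PySem.List.pyRange 0 (n - ℓ) ℓ).map (· + ℓ) := by
  rw [PySem.List.pyRange_of_pos _ _ hℓ, PySem.List.pyRange_of_pos _ _ hℓ]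
  have h1 : (0:Int) < n := hn
  have harith : ((n - 0 + ℓ - 1) / ℓ).toNat =
      (if (0:Int) < n - ℓ then ((n - ℓ - 0 + ℓ - 1) / ℓ).toNat else 0) + 1 := by
    by_cases h2 : (0:Int) < n - ℓ
    · simp only [h2, if_true]
      have : n - 0 + ℓ - 1 = (n - ℓ - 0 + ℓ - 1) + 1 * ℓ := by ring
      rw [this, Int.add_mul_ediv_right _ _ (by omega : ℓ ≠ 0)]
      have hq : 0 ≤ (n - ℓ - 0 + ℓ - 1) / ℓ := Int.ediv_nonneg (by omega) (by omega)
      omega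
    · simp only [h2, if_false]
      have he : n - 0 + ℓ - 1 = (n - 1) + 1 * ℓ := by ring
      rw [he, Int.add_mul_ediv_right _ _ (by omega : ℓ ≠ 0)]
      have h0 : (n - 1) / ℓ = 0 := Int.ediv_eq_zero_of_lt (by omega) (by omega)
      omega
  rw [if_pos h1, harith, List.range_succ_eq_map]
  simp only [List.map_cons, List.map_map, Nat.cast_zero, mul_zero, add_zero]
  congr 1
  apply List.map_congr_left
  intro k _
  simp only [Function.comp]
  push_cast
  ring

-- a length-ℓ slice at offset i+ℓ of cs is the slice at offset i of cs.drop ℓ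
theorem pvSlice_shift (cs : List Char) (ℓ : Nat) (i : Int) (hi : 0 ≤ i) :
    PySem.List.slice cs (some (i + ℓ)) (some (i + ℓ + ℓ)) =
      PySem.List.slice (cs.drop ℓ) (some i) (some (i + ℓ)) := by
  rw [PySem.List.slice_toNat cs (show (0:Int) ≤ i + (ℓ:Int) by omega) (show (0:Int) ≤ i + (ℓ:Int) + (ℓ:Int) by omega),
      PySem.List.slice_toNat (cs.drop ℓ) hi (show (0:Int) ≤ i + (ℓ:Int) by omega)]
  have h1 : (i + (ℓ:Int) + ℓ).toNat - (i + ℓ).toNat = ℓ := by omega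
  have h2 : (i + (ℓ:Int)).toNat - i.toNat = ℓ := by omega
  have h3 : (i + (ℓ:Int)).toNat = ℓ + i.toNat := by omega
  rw [h1, h2, List.drop_drop, h3]

-- B's strided fold counts the same chunks
theorem pvFoldB_chunks (sub : List Char) (hℓ : 0 < sub.length) :
    ∀ (cs : List Char) (acc : Int),
      (PySem.List.pyRange 0 cs.length sub.length).foldl
        (fun acc i =>
          if PySem.List.slice cs (some i) (some (i + (sub.length : Int))) = sub then acc + 1
          else acc) acc = acc + pvChunkCount sub.length sub cs := by
  intro cs
  induction hn : cs.length using Nat.strong_induction_on generalizing cs with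
  | _ n ih =>
    intro acc
    subst hn
    by_cases h0 : cs.length = 0
    · rw [PySem.List.pyRange_of_pos _ _ (by exact_mod_cast hℓ),
         pvChunkCount_small sub.length sub cs (by omega)]
      simp [h0]
    · have hpeel := pvRange_peel (sub.length : Int) (by exact_mod_cast hℓ)
        (cs.length : Int) (by omega)
      rw [hpeel]
      simp only [List.foldl_cons, List.foldl_map]
      have hhead : PySem.List.slice cs (some 0) (some (0 + (sub.length:Int))) = cs.take sub.length := by
        rw [PySem.List.slice_toNat cs le_rfl (by omega)]
        have e : ((0:Int) + (sub.length:Int)).toNat - (0:Int).toNat = sub.length := by omega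
        rw [e]
        simp
      rw [hhead]
      by_cases hsmall : cs.length < sub.length
      · -- the range is the single index 0; the lone slice is all of cs, too short to equal sub
        have hnil : PySem.List.pyRange 0 ((cs.length:Int) - sub.length) sub.length = [] := by
          rw [PySem.List.pyRange_of_pos _ _ (by exact_mod_cast hℓ)]
          rw [if_neg (by omega : ¬((0:Int) < (cs.length:Int) - (sub.length:Int)))]
          simp
        rw [hnil, pvChunkCount_small sub.length sub cs hsmall]
        have hne : cs.take sub.length ≠ sub := by
          intro h
          have := congrArg List.length h
          simp at this
          omega
        simp [hne]
      · replace hsmall : sub.length ≤ cs.length := by omega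
        -- rewrite each strided slice as a slice of cs.drop sub.length, then apply the IH
        have hcong := PySem.List.foldl_congr_mem
          (PySem.List.pyRange 0 ((cs.length:Int) - sub.length) sub.length)
          (fun acc i =>
            if PySem.List.slice cs (some (i + sub.length)) (some (i + sub.length + sub.length)) = sub
            then acc + 1 else acc)
          (fun acc i =>
            if PySem.List.slice (cs.drop sub.length) (some i) (some (i + (sub.length:Int))) = sub
            then acc + 1 else acc)
          (if cs.take sub.length = sub then acc + 1 else acc)
          (by
            intro a x hx
            have hx0 : 0 ≤ x := ((PySem.List.mem_pyRange_iff_of_pos (by exact_mod_cast hℓ) x).1 hx).1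
            dsimp only
            rw [pvSlice_shift cs sub.length x hx0])
        rw [hcong]
        have hlen : ((cs.drop sub.length).length : Int) = (cs.length : Int) - sub.length := by
          simp
          omega
        rw [← hlen, ih (cs.drop sub.length).length (by simp; omega) (cs.drop sub.length) rfl]
        conv_rhs => rw [pvChunkCount]
        rw [dif_pos ⟨hℓ, hsmall⟩]
        split_ifs <;> ring

-- ===== VERDICT (by name: the statement is the Claim_ definition above) =====
theorem countSubstringOccurrences_spec : Claim_equal_countSubstringOccurrences := by
  intro s sub _ hpre
  unfold Spec_countSubstringOccurrences countSubstringOccurrences countSubstringOccurrences_alt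
  have hℓ : 0 < sub.toList.length := by
    cases h : sub.toList with
    | nil => exact absurd (String.toList_eq_nil_iff.mp h) hpre
    | cons a l => simp
  rw [pvFoldA_filter sub.toList hℓ s.toList [] 0 hℓ,
      pvFoldA_chunks sub.toList hℓ _ [] 0 hℓ (by simp),
      pvFoldB_chunks sub.toList hℓ _ 0]
  simp
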